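-- pv_equiv track=rewrite | github.com/ouzaamohammed/pygit | pygit/diff.py | iter_changed_files
-- ===== SOURCE A (Python) =====
-- from collections import defaultdict
--
-- def compare_trees(*trees):
--     entries = defaultdict(lambda: [None] * len(trees))
--     for i, tree in enumerate(trees):
--         for path, oid in tree.items():
--             entries[path][i] = oid
--
--     for path, oids in entries.items():
--         yield (path, *oids)
--
-- def iter_changed_files(tree_from, tree_to):
--     for path, object_from, object_to in compare_trees(tree_from, tree_to):
--         if object_from != object_to:
--             action = (
--                 "new file"
--                 if not object_from
--                 else "deleted" if not object_to else "modified"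
--             )
--             yield path, action
-- ===== SOURCE B (Python) =====
-- def iter_changed_files(tree_from, tree_to):
--     # pass 1: every path of tree_from, classified against tree_to
--     for path, object_from in tree_from.items():
--         object_to = tree_to.get(path)
--         if object_from != object_to:
--             yield path, (
--                 "new file"
--                 if not object_from
--                 else "deleted" if not object_to else "modified"
--             )
--     # pass 2: paths only in tree_to are always new files
--     for path in tree_to:
--         if path not in tree_from:
--             yield path, "new file"
-- ===== Notes on version B (the rewrite author's own statement) =====
-- stated objective: simpler
-- what changed: B drops the merged-dict generator helper (compare_trees/defaultdict) and classifies in two direct passes: tree_from items against tree_to.get, then tree_to-only paths yielded as 'new file'.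
import Mathlib
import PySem

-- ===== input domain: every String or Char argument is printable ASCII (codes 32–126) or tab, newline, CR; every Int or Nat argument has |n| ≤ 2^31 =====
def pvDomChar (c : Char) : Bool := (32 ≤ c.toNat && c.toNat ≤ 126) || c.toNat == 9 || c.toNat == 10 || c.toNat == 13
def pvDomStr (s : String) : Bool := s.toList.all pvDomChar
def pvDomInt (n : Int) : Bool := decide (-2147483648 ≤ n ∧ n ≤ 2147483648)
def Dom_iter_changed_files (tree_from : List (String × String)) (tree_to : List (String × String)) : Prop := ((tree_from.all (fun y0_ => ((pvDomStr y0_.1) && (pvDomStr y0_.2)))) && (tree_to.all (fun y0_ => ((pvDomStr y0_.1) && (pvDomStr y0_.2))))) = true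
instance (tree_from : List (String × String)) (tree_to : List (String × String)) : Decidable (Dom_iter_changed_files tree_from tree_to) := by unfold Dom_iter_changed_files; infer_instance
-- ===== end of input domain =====

-- B replaces A's merged-dict helper (compare_trees over a defaultdict) by two direct passes over
-- the input dicts; the theorem proves the returned pair lists are equal on every input.


-- ===== PORT A =====
-- Python truthiness of an Optional[str]: None and "" are falsy.
def pvFalsy : Option String → Bool
  | none => true
  | some s => s.toList.isEmpty

-- the conditional expression choosing the action (identical text in A and B, ported once)
def pvAction (object_from object_to : Option String) : String :=
  if pvFalsy object_from then "new file"
  else if pvFalsy object_to then "deleted" else "modified"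

-- compare_trees inlined for its single two-tree call site: entries is a dict
-- path ↦ (oid_from?, oid_to?); 'entries[path][i] = oid' becomes an insert that keeps the other
-- slot (defaultdict default [None, None] ↦ (none, none)); the final loop yields conditionally.
def iter_changed_files (tree_from : List (String × String)) (tree_to : List (String × String)) : List (String × String) :=
  let entries1 := tree_from.foldl
    (fun d q => d.insert q.1 (some q.2, (d.getD q.1 (none, none)).2)) PySem.Dict.empty
  let entries2 := tree_to.foldl
    (fun d q => d.insert q.1 ((d.getD q.1 (none, none)).1, some q.2)) entries1
  entries2.items.foldl
    (fun acc e => if e.2.1 ≠ e.2.2 then acc ++ [(e.1, pvAction e.2.1 e.2.2)] else acc) []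

-- ===== PORT B =====
-- pass 1: tree_from items against tree_to.get; pass 2: tree_to-only paths are 'new file'.
def iter_changed_files_alt (tree_from : List (String × String)) (tree_to : List (String × String)) : List (String × String) :=
  let dF := PySem.Dict.ofList tree_from
  let dT := PySem.Dict.ofList tree_to
  (dF.items.filterMap (fun q =>
      let object_to := dT.get? q.1
      if some q.2 ≠ object_to then some (q.1, pvAction (some q.2) object_to) else none))
  ++ (dT.items.filterMap (fun q =>
      if dF.contains q.1 = true then none else some (q.1, "new file")))

-- ===== PRECONDITION & SPEC =====
def Spec_iter_changed_files (tree_from : List (String × String)) (tree_to : List (String × String)) (out : List (String × String)) : Prop := out = iter_changed_files_alt tree_from tree_to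
instance (tree_from : List (String × String)) (tree_to : List (String × String)) (out : List (String × String)) : Decidable (Spec_iter_changed_files tree_from tree_to out) := by unfold Spec_iter_changed_files; infer_instance

-- ===== CLAIM (what is proved, stated in full; the proofs are below) =====
def Claim_equal_iter_changed_files : Prop := ∀ (tree_from : List (String × String)) (tree_to : List (String × String)), Dom_iter_changed_files tree_from tree_to → Spec_iter_changed_files tree_from tree_to (iter_changed_files tree_from tree_to)

-- ===== LEMMAS AND PROOFS =====

def pvInv (Fd : PySem.Dict String String) (d : PySem.Dict String (Option String × Option String))
    (T : PySem.Dict String String) : Prop :=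
  d.items = Fd.items.map (fun q => (q.1, ((some q.2 : Option String), T.get? q.1)))
    ++ (T.items.filter (fun q => !(Fd.contains q.1))).map
        (fun q => (q.1, ((none : Option String), some q.2)))

theorem pv_find?_filter_key {α : Type} (l : List α) (pf c : α → Bool)
    (h : ∀ x, c x = true → pf x = true) : (l.filter pf).find? c = l.find? c := by
  induction l with
  | nil => rfl
  | cons a l ih =>
    by_cases hc : c a = true
    · rw [List.filter_cons, h a hc]; simp [List.find?_cons, hc, ih]
    · rw [List.filter_cons]
      cases hp : pf a <;> simp [List.find?_cons, hc, ih]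

theorem pv_mem_contains (D : PySem.Dict String String) (q : String × String)
    (hq : q ∈ D.items) : D.contains q.1 = true := by
  simp only [PySem.Dict.contains, List.any_eq_true]
  exact ⟨q, hq, by simp⟩

theorem pv_step2' (Fd T : PySem.Dict String String) (hF : Fd.keys.Nodup)
    (d : PySem.Dict String (Option String × Option String)) (p o : String)
    (h : pvInv Fd d T) :
    pvInv Fd (d.insert p ((d.getD p (none, none)).1, some o)) (T.insert p o) := by
  have hdget : d.get? p
      = ((Fd.items.find? (fun q : String × String => q.1 == p)).map
          (fun q => ((some q.2 : Option String), T.get? q.1))).or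
        (((T.items.filter (fun q => !(Fd.contains q.1))).find? (fun q : String × String => q.1 == p)).map
          (fun q => ((none : Option String), some q.2))) := by
    unfold pvInv at h
    rw [show d.get? p = Option.map (fun x : String × (Option String × Option String) => x.2)
        (List.find? (fun x => x.1 == p) d.items) from rfl, h, List.find?_append,
      List.find?_map, List.find?_map]
    rw [show ((fun x : String × (Option String × Option String) => x.1 == p) ∘
          fun q : String × String => (q.1, ((some q.2 : Option String), T.get? q.1)))
        = (fun q : String × String => q.1 == p) from rfl]
    rw [show ((fun x : String × (Option String × Option String) => x.1 == p) ∘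
          fun q : String × String => (q.1, ((none : Option String), some q.2)))
        = (fun q : String × String => q.1 == p) from rfl]
    cases Fd.items.find? (fun q : String × String => q.1 == p) <;>
      cases (T.items.filter (fun q => !(Fd.contains q.1))).find? (fun q : String × String => q.1 == p) <;> rfl
  by_cases hFc : Fd.contains p = true
  · -- p is a key of tree_from: overwrite inside the first segment
    have hsome : (Fd.items.find? (fun q : String × String => q.1 == p)).isSome := by
      refine List.find?_isSome.mpr ?_
      have := List.any_eq_true.mp hFc
      simpa using this
    obtain ⟨qv, hqv⟩ := Option.isSome_iff_exists.mp hsome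
    have hqv1 : qv.1 = p := by simpa using List.find?_some hqv
    have hFget : Fd.get? p = some qv.2 := by
      show (Fd.items.find? (fun q : String × String => q.1 == p)).map (fun q => q.2) = _
      rw [hqv]; rfl
    have hdp : d.get? p = some (some qv.2, T.get? qv.1) := by rw [hdget, hqv]; rfl
    have hfst : (d.getD p (none, none)).1 = some qv.2 := by rw [PySem.Dict.getD, hdp]; rfl
    have hdc : d.contains p = true := by rw [PySem.Dict.contains_eq_isSome_get?, hdp]; rfl
    unfold pvInv at h ⊢
    rw [PySem.Dict.items_insert, hdc, if_pos rfl, h, List.map_append, hfst]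
    congr 1
    · rw [List.map_map]
      apply List.map_congr_left
      intro q hq
      by_cases hqp : q.1 = p
      · have hq2 : Fd.get? q.1 = some q.2 := PySem.Dict.get?_of_mem_items Fd hq hF
        rw [hqp] at hq2
        have : qv.2 = q.2 := by rw [hFget] at hq2; exact (Option.some_inj.mp hq2)
        simp [Function.comp, hqp, this, PySem.Dict.get?_insert_self]
      · simp [Function.comp, hqp, PySem.Dict.get?_insert_of_ne _ _ hqp]
    · rw [List.map_map]
      have hmapid : ((T.items.filter (fun q => !(Fd.contains q.1))).map
            ((fun x : String × (Option String × Option String) =>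
                if x.1 == p then (p, (some qv.2, some o)) else x) ∘
              fun q : String × String => (q.1, ((none : Option String), some q.2))))
          = (T.items.filter (fun q => !(Fd.contains q.1))).map
              (fun q : String × String => (q.1, ((none : Option String), some q.2))) := by
        apply List.map_congr_left
        intro x hx
        have hpf : (!(Fd.contains x.1)) = true := (List.mem_filter.mp hx).2
        have hxp : x.1 ≠ p := by intro hxp; rw [hxp, hFc] at hpf; simp at hpf
        simp [Function.comp, hxp]
      rw [hmapid]
      by_cases hTc : T.contains p = true
      · rw [PySem.Dict.items_insert_of_contains _ _ hTc, List.filter_map]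
        have hfc : List.filter ((fun q : String × String => !(Fd.contains q.1)) ∘
              fun x : String × String => if (x.1 == p) = true then (p, o) else x) T.items
            = List.filter (fun q : String × String => !(Fd.contains q.1)) T.items :=
          List.filter_congr (by
            intro x _
            by_cases hxp : x.1 = p
            · simp [Function.comp, hxp, hFc]
            · simp [Function.comp, hxp])
        rw [hfc, List.map_map]
        apply (List.map_congr_left _).symm
        intro x hx
        have hpf : (!(Fd.contains x.1)) = true := (List.mem_filter.mp hx).2
        have hxp : x.1 ≠ p := by intro hxp; rw [hxp, hFc] at hpf; simp at hpf
        simp [Function.comp, hxp]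
      · rw [PySem.Dict.items_insert_of_not_contains _ _ (by simp [hTc]), List.filter_append]
        have : List.filter (fun q : String × String => !(Fd.contains q.1)) [(p, o)] = [] := by
          simp [List.filter, hFc]
        rw [this, List.append_nil]
  · -- p is not a key of tree_from
    have hFc' : Fd.contains p = false := by cases hcc : Fd.contains p <;> simp_all
    have hFnone : Fd.items.find? (fun q : String × String => q.1 == p) = none := by
      rw [List.find?_eq_none]
      intro x hx hbx
      have : Fd.contains x.1 = true := pv_mem_contains Fd x hx
      rw [(by simpa using hbx : x.1 = p), hFc'] at this
      exact Bool.false_ne_true this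
    have hkey : ∀ x : String × String, (x.1 == p) = true → (!(Fd.contains x.1)) = true := by
      intro x hx
      rw [(by simpa using hx : x.1 = p), hFc']
      rfl
    have hdget2 : d.get? p = (T.items.find? (fun q : String × String => q.1 == p)).map
        (fun q => ((none : Option String), some q.2)) := by
      rw [hdget, hFnone, pv_find?_filter_key _ _ _ hkey]
      cases T.items.find? (fun q : String × String => q.1 == p) <;> rfl
    have hTget : T.get? p = (T.items.find? (fun q : String × String => q.1 == p)).map (fun q => q.2) := rfl
    by_cases hTc : T.contains p = true
    · have hsomeT : (T.items.find? (fun q : String × String => q.1 == p)).isSome := by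
        refine List.find?_isSome.mpr ?_
        simpa using List.any_eq_true.mp hTc
      obtain ⟨qw, hqw⟩ := Option.isSome_iff_exists.mp hsomeT
      have hdp : d.get? p = some (none, some qw.2) := by rw [hdget2, hqw]; rfl
      have hfst : (d.getD p (none, none)).1 = none := by rw [PySem.Dict.getD, hdp]; rfl
      have hdc : d.contains p = true := by rw [PySem.Dict.contains_eq_isSome_get?, hdp]; rfl
      unfold pvInv at h ⊢
      rw [PySem.Dict.items_insert_of_contains _ _ hdc, h, List.map_append, hfst]
      congr 1
      · rw [List.map_map]
        apply List.map_congr_left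
        intro q hq
        have hqp : q.1 ≠ p := by
          intro hqp
          have := pv_mem_contains Fd q hq
          rw [hqp, hFc'] at this
          exact Bool.false_ne_true this
        simp [Function.comp, hqp, PySem.Dict.get?_insert_of_ne _ _ hqp]
      · rw [List.map_map, PySem.Dict.items_insert_of_contains _ _ hTc, List.filter_map]
        have hfc : List.filter ((fun q : String × String => !(Fd.contains q.1)) ∘
              fun x : String × String => if (x.1 == p) = true then (p, o) else x) T.items
            = List.filter (fun q : String × String => !(Fd.contains q.1)) T.items :=
          List.filter_congr (by
            intro x _
            by_cases hxp : x.1 = p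
            · simp [Function.comp, hxp, hFc']
            · simp [Function.comp, hxp])
        rw [hfc, List.map_map]
        apply List.map_congr_left
        intro x _
        by_cases hxp : x.1 = p
        · simp [Function.comp, hxp]
        · simp [Function.comp, hxp]
    · have hTnone : T.items.find? (fun q : String × String => q.1 == p) = none := by
        rw [List.find?_eq_none]
        intro x hx hbx
        have : T.contains x.1 = true := pv_mem_contains T x hx
        rw [(by simpa using hbx : x.1 = p)] at this
        exact hTc this
      have hdp : d.get? p = none := by rw [hdget2, hTnone]; rfl
      have hfst : (d.getD p (none, none)).1 = none := by rw [PySem.Dict.getD, hdp]; rfl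
      have hdc : d.contains p = false := by rw [PySem.Dict.contains_eq_isSome_get?, hdp]; rfl
      unfold pvInv at h ⊢
      rw [PySem.Dict.items_insert_of_not_contains _ _ hdc, h, hfst,
        PySem.Dict.items_insert_of_not_contains _ _ (by cases hcc : T.contains p <;> simp_all),
        List.filter_append]
      have hf1 : List.filter (fun q : String × String => !(Fd.contains q.1)) [(p, o)] = [(p, o)] := by
        simp [List.filter, hFc']
      rw [hf1]
      simp only [List.map_cons, List.map_nil, List.append_assoc]
      congr 1
      · apply List.map_congr_left
        intro q hq
        have hqp : q.1 ≠ p := by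
          intro hqp
          have := pv_mem_contains Fd q hq
          rw [hqp, hFc'] at this
          exact Bool.false_ne_true this
        simp [PySem.Dict.get?_insert_of_ne _ _ hqp]
      · rw [List.map_append]
        rfl


theorem pv_phase2 (Fd : PySem.Dict String String) (hF : Fd.keys.Nodup)
    (l : List (String × String))
    (d : PySem.Dict String (Option String × Option String)) (T : PySem.Dict String String)
    (h : pvInv Fd d T) :
    pvInv Fd (l.foldl (fun d q => d.insert q.1 ((d.getD q.1 (none, none)).1, some q.2)) d)
      (l.foldl (fun D q => D.insert q.1 q.2) T) := by
  induction l generalizing d T with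
  | nil => exact h
  | cons a l ih => exact ih _ _ (pv_step2' Fd T hF d a.1 a.2 h)

theorem pv_filterMap_if {α β : Type} (c : α → Prop) [DecidablePred c] (g : α → β) (l : List α) :
    l.filterMap (fun x => if c x then some (g x) else none)
      = (l.filter (fun x => decide (c x))).map g := by
  induction l with
  | nil => rfl
  | cons a l ih => by_cases h : c a <;> simp [h, ih]

theorem pv_filterMap_ifnot {α β : Type} (c : α → Bool) (g : α → β) (l : List α) :
    l.filterMap (fun x => if c x = true then none else some (g x))
      = (l.filter (fun x => !c x)).map g := by
  induction l with
  | nil => rfl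
  | cons a l ih => cases h : c a <;> simp [h, ih]

theorem pv_phase1 (l : List (String × String))
    (d : PySem.Dict String (Option String × Option String)) (D : PySem.Dict String String)
    (h : d.items = D.items.map (fun q => (q.1, ((some q.2 : Option String), (none : Option String))))) :
    (l.foldl (fun d q => d.insert q.1 (some q.2, (d.getD q.1 (none, none)).2)) d).items
      = (l.foldl (fun D q => D.insert q.1 q.2) D).items.map
          (fun q => (q.1, ((some q.2 : Option String), (none : Option String)))) := by
  induction l generalizing d D with
  | nil => simpa using h
  | cons a l ih =>
    simp only [List.foldl_cons]
    apply ih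
    have hget : d.get? a.1 = (D.get? a.1).map (fun v => ((some v : Option String), (none : Option String))) := by
      simp only [PySem.Dict.get?, h, List.find?_map]
      rw [show ((fun p : String × (Option String × Option String) => p.1 == a.1) ∘
            fun q : String × String => (q.1, ((some q.2 : Option String), (none : Option String))))
          = (fun q : String × String => q.1 == a.1) from rfl]
      cases List.find? (fun q : String × String => q.1 == a.1) D.items <;> rfl
    have hcont : d.contains a.1 = D.contains a.1 := by
      rw [PySem.Dict.contains_eq_isSome_get?, PySem.Dict.contains_eq_isSome_get?, hget]
      cases D.get? a.1 <;> rfl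
    have hsnd : (d.getD a.1 (none, none)).2 = none := by
      rw [PySem.Dict.getD, hget]; cases D.get? a.1 <;> rfl
    rw [hsnd, PySem.Dict.items_insert, PySem.Dict.items_insert, hcont]
    by_cases hc : D.contains a.1 = true
    · simp only [hc, if_pos, h, List.map_map]
      apply List.map_congr_left
      intro q _
      by_cases hq : q.1 = a.1 <;> simp [hq]
    · simp [hc, h]

-- ===== VERDICT (by name: the statement is the Claim_ definition above) =====
theorem iter_changed_files_spec : Claim_equal_iter_changed_files := by
  intro tf tt _
  unfold Spec_iter_changed_files
  have h0 : pvInv (PySem.Dict.ofList tf)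
      (tf.foldl (fun d q => d.insert q.1 (some q.2, (d.getD q.1 (none, none)).2)) PySem.Dict.empty)
      PySem.Dict.empty := by
    unfold pvInv
    rw [pv_phase1 tf PySem.Dict.empty PySem.Dict.empty rfl]
    simp only [PySem.Dict.get?_empty]
    rw [show PySem.Dict.empty.items = ([] : List (String × String)) from rfl]
    simp only [List.filter_nil, List.map_nil, List.append_nil]
    rfl
  have h2 := pv_phase2 (PySem.Dict.ofList tf) (PySem.Dict.nodup_keys_ofList tf) tt _ PySem.Dict.empty h0
  unfold pvInv at h2
  simp only [iter_changed_files, iter_changed_files_alt]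
  rw [PySem.List.foldl_append_ite
        (fun e : String × (Option String × Option String) => e.2.1 ≠ e.2.2)
        (fun e : String × (Option String × Option String) => (e.1, pvAction e.2.1 e.2.2)) _ [],
      h2, List.filter_append, List.map_append,
      pv_filterMap_if (fun q : String × String => some q.2 ≠ (PySem.Dict.ofList tt).get? q.1)
        (fun q : String × String => (q.1, pvAction (some q.2) ((PySem.Dict.ofList tt).get? q.1))),
      pv_filterMap_ifnot (fun q : String × String => (PySem.Dict.ofList tf).contains q.1)
        (fun q : String × String => (q.1, "new file"))]
  simp only [List.nil_append]
  congr 1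
  · rw [List.filter_map, List.map_map]
    rfl
  · rw [List.filter_map]
    have hall : List.filter ((fun e : String × (Option String × Option String) => decide (e.2.1 ≠ e.2.2)) ∘
          fun q : String × String => (q.1, ((none : Option String), some q.2)))
        (List.filter (fun q : String × String => !((PySem.Dict.ofList tf).contains q.1))
          (List.foldl (fun D q => D.insert q.1 q.2) PySem.Dict.empty tt).items)
        = List.filter (fun q : String × String => !((PySem.Dict.ofList tf).contains q.1))
            (List.foldl (fun D q => D.insert q.1 q.2) PySem.Dict.empty tt).items := by
      apply List.filter_eq_self.mpr
      intro x _
      simp [Function.comp]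
    rw [hall, List.map_map]
    rfl
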